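-- pv_equiv track=rewrite | github.com/AlexWanghaoming/mango | colin_plot/mummer_bundle_telo.py | judge_dir
-- ===== SOURCE A (Python) =====
-- def judge_dir(test):
--     c1,c2=0,0
--     for i in test:
--         if i[-2] == "1":
--             c1 = c1 + int(i[-1])
--         else:
--             c2=c2 + int(i[-1])
--
--     return "1" if c1 > c2 else "-1"
-- ===== SOURCE B (Python) =====
-- def judge_dir(test):
--     def net(xs):
--         if not xs:
--             return 0
--         head, rest = xs[0], xs[1:]
--         v = int(head[-1])
--         return (v if head[-2] == "1" else -v) + net(rest)
--     return "1" if net(test) > 0 else "-1"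
-- ===== Notes on version B (the rewrite author's own statement) =====
-- stated objective: alternative
-- what changed: B replaces A's iterative loop over two separate bucket accumulators (c1, c2) by a structural recursion computing a single signed net score, returning "1" iff the net score is positive.
import Mathlib
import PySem

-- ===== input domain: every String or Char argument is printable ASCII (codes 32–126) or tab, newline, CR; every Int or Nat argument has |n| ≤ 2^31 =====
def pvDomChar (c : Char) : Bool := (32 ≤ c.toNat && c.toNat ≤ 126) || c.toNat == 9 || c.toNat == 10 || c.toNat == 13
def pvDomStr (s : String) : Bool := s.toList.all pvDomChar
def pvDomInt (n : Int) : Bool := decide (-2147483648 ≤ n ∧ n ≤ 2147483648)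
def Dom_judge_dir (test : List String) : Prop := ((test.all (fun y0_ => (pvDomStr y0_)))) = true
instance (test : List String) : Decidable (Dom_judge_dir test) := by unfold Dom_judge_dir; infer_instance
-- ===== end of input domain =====

-- B replaces A's iterative two-bucket loop by a structural recursion on a single signed net score; objective: alternative decomposition.

-- ===== PORT A =====
-- one step of A's loop over (c1, c2); raising positions are excluded by Pre_, the .getD defaults are never hit inside it
def judgeStepA (p : Int × Int) (i : String) : Int × Int :=
  if (PySem.Str.pyGet? i (-2)).getD ' ' == '1' then
    (p.1 + ((PySem.Int.ofChars? [(PySem.Str.pyGet? i (-1)).getD ' ']).getD 0), p.2)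
  else
    (p.1, p.2 + ((PySem.Int.ofChars? [(PySem.Str.pyGet? i (-1)).getD ' ']).getD 0))

def judge_dir (test : List String) : String :=
  let r := test.foldl judgeStepA (0, 0)
  if r.1 > r.2 then "1" else "-1"

-- ===== PORT B =====
-- Source B's recursive helper `net`
def judgeNetB (xs : List String) : Int :=
  match xs with
  | [] => 0
  | head :: rest =>
      let v := (PySem.Int.ofChars? [(PySem.Str.pyGet? head (-1)).getD ' ']).getD 0
      (if (PySem.Str.pyGet? head (-2)).getD ' ' == '1' then v else -v) + judgeNetB rest

def judge_dir_alt (test : List String) : String :=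
  if judgeNetB test > 0 then "1" else "-1"

-- ===== PRECONDITION & SPEC =====
-- Pre_ excludes inputs on which Python A raises: a string shorter than 2 (IndexError on i[-2])
-- or whose last character is not a decimal digit (ValueError from int(i[-1])).
def Pre_judge_dir (test : List String) : Prop :=
  ∀ s ∈ test, 2 ≤ s.toList.length ∧ (s.toList.getLastD ' ').isDigit = true
instance (test : List String) : Decidable (Pre_judge_dir test) := by unfold Pre_judge_dir; infer_instance
def pvWitness_judge_dir : List String := ["a13", "-12"]
def Spec_judge_dir (test : List String) (out : String) : Prop := out = judge_dir_alt test
instance (test : List String) (out : String) : Decidable (Spec_judge_dir test out) := by unfold Spec_judge_dir; infer_instance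

-- ===== CLAIM (what is proved, stated in full; the proofs are below) =====
def Claim_equal_judge_dir : Prop := ∀ (test : List String), Dom_judge_dir test → Pre_judge_dir test → Spec_judge_dir test (judge_dir test)

-- ===== LEMMAS AND PROOFS =====
lemma judge_fold_sub (test : List String) (p : Int × Int) :
    (test.foldl judgeStepA p).1 - (test.foldl judgeStepA p).2
      = p.1 - p.2 + judgeNetB test := by
  induction test generalizing p with
  | nil => simp [judgeNetB]
  | cons i rest ih =>
      simp only [List.foldl_cons, judgeNetB]
      rw [ih]
      unfold judgeStepA
      split_ifs <;> simp <;> ring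

-- ===== VERDICT (by name: the statement is the Claim_ definition above) =====
theorem judge_dir_spec : Claim_equal_judge_dir := by
  intro test _ _
  unfold Spec_judge_dir judge_dir judge_dir_alt
  have h := judge_fold_sub test (0, 0)
  set r := test.foldl judgeStepA (0, 0) with hr
  have : r.1 > r.2 ↔ judgeNetB test > 0 := by omega
  simp only [gt_iff_lt] at this ⊢
  split_ifs with h1 h2 h2 <;> first | rfl | (exact absurd (this.mp h1) h2) | (exact absurd (this.mpr h2) h1)
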